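-- pv_equiv track=rewrite | github.com/jhwodchuck/The-Great-Camp-Crawl | scripts/ddg_discovery_to_candidate_schema.py | infer_program_family
-- ===== SOURCE A (Python) =====
-- PROGRAM_FAMILY_RULES: list[tuple[str, str]] = [
--     ("pre-college", "college-pre-college"),
--     ("precollege", "college-pre-college"),
--     ("academic", "academic"),
--     ("engineering", "stem"),
--     ("robotics", "stem"),
--     ("coding", "stem"),
--     ("music", "music"),
--     ("band", "music"),
--     ("arts", "arts"),
--     ("sport", "sports"),
--     ("wilderness", "wilderness"),
--     ("family", "family"),
--     ("church", "faith-based"),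
--     ("faith", "faith-based"),
-- ]
--
-- def infer_program_family(text: str) -> list[str]:
--     tags: list[str] = []
--     haystack = text.lower()
--     for needle, tag in PROGRAM_FAMILY_RULES:
--         if needle in haystack and tag not in tags:
--             tags.append(tag)
--     if not tags:
--         tags.append("unspecified")
--     return tags
-- ===== SOURCE B (Python) =====
-- _FAMILY_ORDER = [
--     "college-pre-college", "academic", "stem", "music",
--     "arts", "sports", "wilderness", "family", "faith-based",
-- ]
--
-- # keyword rules indexed by the keyword's first character (text-driven scan)
-- _RULES_BY_FIRST: dict[str, list[tuple[str, str]]] = {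
--     "p": [("pre-college", "college-pre-college"), ("precollege", "college-pre-college")],
--     "a": [("academic", "academic"), ("arts", "arts")],
--     "e": [("engineering", "stem")],
--     "r": [("robotics", "stem")],
--     "c": [("coding", "stem"), ("church", "faith-based")],
--     "m": [("music", "music")],
--     "b": [("band", "music")],
--     "s": [("sport", "sports")],
--     "w": [("wilderness", "wilderness")],
--     "f": [("family", "family"), ("faith", "faith-based")],
-- }
--
--
-- def infer_program_family(text: str) -> list[str]:
--     hay = text.lower()
--     matched: set[str] = set()
--     for i, ch in enumerate(hay):
--         for kw, tag in _RULES_BY_FIRST.get(ch, ()):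
--             if hay.startswith(kw, i):
--                 matched.add(tag)
--     tags = [t for t in _FAMILY_ORDER if t in matched]
--     return tags if tags else ["unspecified"]
-- ===== Notes on version B (the rewrite author's own statement) =====
-- stated objective: alternative
-- what changed: B inverts the traversal: instead of testing each rule keyword against the whole text, it scans the text position by position, dispatching each position through a first-character keyword index to collect matched tags into a set, then emits tags in canonical family order with the usual empty-result fallback tag.
import Mathlib
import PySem

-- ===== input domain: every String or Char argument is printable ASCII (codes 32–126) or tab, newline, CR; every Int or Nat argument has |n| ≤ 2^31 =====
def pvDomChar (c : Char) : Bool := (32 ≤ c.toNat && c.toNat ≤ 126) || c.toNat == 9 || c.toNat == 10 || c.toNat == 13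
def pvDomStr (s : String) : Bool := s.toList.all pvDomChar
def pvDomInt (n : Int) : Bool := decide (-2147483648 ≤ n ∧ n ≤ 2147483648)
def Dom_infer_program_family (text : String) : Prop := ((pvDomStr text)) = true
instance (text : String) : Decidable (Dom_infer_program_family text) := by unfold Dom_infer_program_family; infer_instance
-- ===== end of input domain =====

-- B scans the TEXT position by position, dispatching on the current character through a
-- first-character keyword index and collecting matched tags in a set, then emits tags in
-- canonical family order (alternative algorithm; same observable behaviour).

-- ===== PORT A =====
def PROGRAM_FAMILY_RULES : List (String × String) := [
  ("pre-college", "college-pre-college"),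
  ("precollege", "college-pre-college"),
  ("academic", "academic"),
  ("engineering", "stem"),
  ("robotics", "stem"),
  ("coding", "stem"),
  ("music", "music"),
  ("band", "music"),
  ("arts", "arts"),
  ("sport", "sports"),
  ("wilderness", "wilderness"),
  ("family", "family"),
  ("church", "faith-based"),
  ("faith", "faith-based")]

def infer_program_family (text : String) : List String :=
  let haystack := PySem.Str.lower text
  let tags := PROGRAM_FAMILY_RULES.foldl
    (fun tags p =>
      if PySem.Str.isIn p.1 haystack && !(tags.contains p.2) then tags ++ [p.2] else tags)
    []
  if tags = [] then tags ++ ["unspecified"] else tags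

-- ===== PORT B =====
def FAMILY_ORDER : List String := [
  "college-pre-college", "academic", "stem", "music",
  "arts", "sports", "wilderness", "family", "faith-based"]

-- Source B's _RULES_BY_FIRST dict, keyed by the keyword's first character
def RULES_BY_FIRST (c : Char) : List (String × String) :=
  if c = 'p' then [("pre-college", "college-pre-college"), ("precollege", "college-pre-college")]
  else if c = 'a' then [("academic", "academic"), ("arts", "arts")]
  else if c = 'e' then [("engineering", "stem")]
  else if c = 'r' then [("robotics", "stem")]
  else if c = 'c' then [("coding", "stem"), ("church", "faith-based")]
  else if c = 'm' then [("music", "music")]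
  else if c = 'b' then [("band", "music")]
  else if c = 's' then [("sport", "sports")]
  else if c = 'w' then [("wilderness", "wilderness")]
  else if c = 'f' then [("family", "family"), ("faith", "faith-based")]
  else []

-- Source B's position loop: 'hay.startswith(kw, i)' is exactly 'kw is a prefix of the suffix
-- of hay starting at i' (kw prefix of c :: rest), ported by structural recursion on suffixes
def pvScan (matched : PySem.Set String) : List Char → PySem.Set String
  | [] => matched
  | c :: rest =>
    let m := (RULES_BY_FIRST c).foldl
      (fun m p => if PySem.Chars.startswith (c :: rest) p.1.toList then PySem.Set.add m p.2 else m)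
      matched
    pvScan m rest

def infer_program_family_alt (text : String) : List String :=
  let hay := (PySem.Str.lower text).toList
  let matched := pvScan PySem.Set.empty hay
  let tags := FAMILY_ORDER.filter (fun t => PySem.Set.contains matched t)
  if tags = [] then ["unspecified"] else tags

-- ===== PRECONDITION & SPEC =====
def Spec_infer_program_family (text : String) (out : List String) : Prop := out = infer_program_family_alt text
instance (text : String) (out : List String) : Decidable (Spec_infer_program_family text out) := by unfold Spec_infer_program_family; infer_instance

-- ===== CLAIM (what is proved, stated in full; the proofs are below) =====
def Claim_equal_infer_program_family : Prop := ∀ (text : String), Dom_infer_program_family text → Spec_infer_program_family text (infer_program_family text)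

-- ===== LEMMAS AND PROOFS =====

-- A-side: characterize A's dedup fold over the flat rule list via a tag-grouped view
def pvGroups : List (String × List String) := [
  ("college-pre-college", ["pre-college", "precollege"]),
  ("academic", ["academic"]),
  ("stem", ["engineering", "robotics", "coding"]),
  ("music", ["music", "band"]),
  ("arts", ["arts"]),
  ("sports", ["sport"]),
  ("wilderness", ["wilderness"]),
  ("family", ["family"]),
  ("faith-based", ["church", "faith"])]

def pvStep (h : String) (tags : List String) (p : String × String) : List String :=
  if PySem.Str.isIn p.1 h && !(tags.contains p.2) then tags ++ [p.2] else tags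

theorem pvStep_group (h t : String) (kws : List String) (acc : List String) :
    ((kws.map (fun k => (k, t))).foldl (pvStep h) acc) =
      if t ∈ acc then acc
      else if kws.any (fun k => PySem.Str.isIn k h) then acc ++ [t] else acc := by
  induction kws generalizing acc with
  | nil => simp
  | cons k kws ih =>
    simp only [List.map, List.foldl, List.any]
    rw [ih]
    by_cases hc : t ∈ acc
    · simp [pvStep, hc]
    · by_cases hk : PySem.Chars.isIn k.toList h.toList
      · simp [pvStep, hc, hk]
      · simp [pvStep, hc, hk]

theorem pvStep_groups (h : String) (groups : List (String × List String))
    (acc : List String)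
    (hfresh : ∀ p ∈ groups, acc.contains p.1 = false)
    (hnd : (groups.map Prod.fst).Nodup) :
    ((groups.flatMap (fun p => p.2.map (fun k => (k, p.1)))).foldl (pvStep h) acc) =
      acc ++ (groups.filter (fun p => p.2.any (fun kw => PySem.Str.isIn kw h))).map Prod.fst := by
  induction groups generalizing acc with
  | nil => simp
  | cons g groups ih =>
    simp only [List.flatMap_cons, List.foldl_append, List.filter_cons]
    rw [pvStep_group h g.1 g.2 acc]
    have hg : g.1 ∉ acc := by
      have := hfresh g (by simp); simpa using this
    simp only [List.map_cons, List.nodup_cons] at hnd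
    by_cases hm : g.2.any (fun kw => PySem.Str.isIn kw h)
    · rw [if_neg hg, if_pos hm, if_pos hm,
        ih (acc ++ [g.1]) ?_ hnd.2]
      · simp
      · intro p hp
        have h1 := hfresh p (by simp [hp])
        have h2 : p.1 ≠ g.1 := by
          intro he
          exact hnd.1 (he ▸ List.mem_map_of_mem hp)
        simp_all
    · rw [if_neg hg, if_neg (by simpa using hm), if_neg (by simpa using hm),
        ih acc (fun p hp => hfresh p (by simp [hp])) hnd.2]

-- B-side machinery
theorem pvFold_mem (u : List Char) (l : List (String × String)) (m : PySem.Set String) (t : String) :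
    (t ∈ l.foldl (fun m p => if PySem.Chars.startswith u p.1.toList then PySem.Set.add m p.2 else m) m) ↔
      t ∈ m ∨ ∃ p ∈ l, PySem.Chars.startswith u p.1.toList = true ∧ p.2 = t := by
  induction l generalizing m with
  | nil => simp
  | cons q l ih =>
    simp only [List.foldl_cons]
    rw [ih]
    by_cases hq : PySem.Chars.startswith u q.1.toList
    · simp [hq, PySem.Set.mem_add]
      tauto
    · simp [hq]

theorem pvByFirst_sound (c : Char) (p : String × String) (hp : p ∈ RULES_BY_FIRST c) :
    p ∈ PROGRAM_FAMILY_RULES ∧ p.1.toList.head? = some c := by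
  unfold RULES_BY_FIRST at hp
  split_ifs at hp <;> subst_vars <;> fin_cases hp <;> exact ⟨by decide, by decide⟩

theorem pvByFirst_complete (p : String × String) (hp : p ∈ PROGRAM_FAMILY_RULES) (c : Char)
    (hc : p.1.toList.head? = some c) : p ∈ RULES_BY_FIRST c := by
  fin_cases hp <;> simp_all <;> (cases hc; decide)

theorem pvRules_kw_ne (p : String × String) (hp : p ∈ PROGRAM_FAMILY_RULES) : p.1.toList ≠ [] := by
  fin_cases hp <;> decide

theorem pvPrefix_drop_cons (kw : List Char) (c : Char) (rest : List Char) :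
    (∃ j, kw <+: (c :: rest).drop j) ↔ kw <+: (c :: rest) ∨ ∃ j, kw <+: rest.drop j := by
  constructor
  · rintro ⟨j, h⟩
    cases j with
    | zero => exact Or.inl (by simpa using h)
    | succ j => exact Or.inr ⟨j, by simpa using h⟩
  · rintro (h | ⟨j, h⟩)
    · exact ⟨0, by simpa⟩
    · exact ⟨j + 1, by simpa⟩

theorem pvScan_mem (s : List Char) (m : PySem.Set String) (t : String) :
    (t ∈ pvScan m s) ↔
      t ∈ m ∨ ∃ p ∈ PROGRAM_FAMILY_RULES, p.2 = t ∧ ∃ j, p.1.toList <+: s.drop j := by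
  induction s generalizing m with
  | nil =>
    simp only [pvScan]
    constructor
    · exact Or.inl
    · rintro (h | ⟨p, hp, rfl, j, hpre⟩)
      · exact h
      · exact absurd (List.prefix_nil.mp (by simpa using hpre)) (pvRules_kw_ne p hp)
  | cons c rest ih =>
    simp only [pvScan]
    rw [ih, pvFold_mem]
    constructor
    · rintro ((h | ⟨p, hp, hsw, rfl⟩) | ⟨p, hp, rfl, j, hpre⟩)
      · exact Or.inl h
      · refine Or.inr ⟨p, (pvByFirst_sound c p hp).1, rfl, 0, ?_⟩
        simpa using (PySem.Chars.startswith_iff _ _).mp hsw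
      · exact Or.inr ⟨p, hp, rfl, j + 1, by simpa using hpre⟩
    · rintro (h | ⟨p, hp, rfl, j, hpre⟩)
      · exact Or.inl (Or.inl h)
      · rcases (pvPrefix_drop_cons _ _ _).mp ⟨j, hpre⟩ with h0 | ⟨j', hj'⟩
        · refine Or.inl (Or.inr ⟨p, ?_, (PySem.Chars.startswith_iff _ _).mpr h0, rfl⟩)
          apply pvByFirst_complete p hp
          rcases hk : p.1.toList with _ | ⟨k, ks⟩
          · exact absurd hk (pvRules_kw_ne p hp)
          · rw [hk] at h0
            rcases List.cons_prefix_cons.mp h0 with ⟨rfl, -⟩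
            simp
        · exact Or.inr ⟨p, hp, rfl, j', hj'⟩

theorem pvContains_tag (s : List Char) (t : String) :
    (t ∈ pvScan PySem.Set.empty s) ↔
      ∃ p ∈ PROGRAM_FAMILY_RULES, p.2 = t ∧ PySem.Chars.isIn p.1.toList s = true := by
  rw [pvScan_mem]
  simp only [PySem.Set.empty, List.not_mem_nil, false_or]
  constructor
  · rintro ⟨p, hp, rfl, hj⟩
    exact ⟨p, hp, rfl, (PySem.Chars.exists_prefix_drop_iff_isIn _ _).mp hj⟩
  · rintro ⟨p, hp, rfl, hin⟩
    exact ⟨p, hp, rfl, (PySem.Chars.exists_prefix_drop_iff_isIn _ _).mpr hin⟩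

set_option maxHeartbeats 1000000 in
theorem pvAB_eq (text : String) : infer_program_family text = infer_program_family_alt text := by
  have hflat : PROGRAM_FAMILY_RULES =
      pvGroups.flatMap (fun p => p.2.map (fun k => (k, p.1))) := by rfl
  have hA : infer_program_family text =
      (if (PROGRAM_FAMILY_RULES.foldl (pvStep (PySem.Str.lower text)) []) = []
       then (PROGRAM_FAMILY_RULES.foldl (pvStep (PySem.Str.lower text)) []) ++ ["unspecified"]
       else (PROGRAM_FAMILY_RULES.foldl (pvStep (PySem.Str.lower text)) [])) := rfl
  rw [hA, hflat,
    pvStep_groups (PySem.Str.lower text) pvGroups []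
      (by intro p _; rfl) (by simp [pvGroups])]
  unfold infer_program_family_alt
  simp only [List.nil_append]
  have hfilter : FAMILY_ORDER.filter
      (fun t => PySem.Set.contains (pvScan PySem.Set.empty (PySem.Str.lower text).toList) t) =
      (pvGroups.filter (fun p => p.2.any (fun kw => PySem.Str.isIn kw (PySem.Str.lower text)))).map Prod.fst := by
    have hc : ∀ t, decide (t ∈ pvScan PySem.Set.empty (PySem.Str.lower text).toList) =
        PROGRAM_FAMILY_RULES.any (fun p => p.2 == t && PySem.Chars.isIn p.1.toList (PySem.Str.lower text).toList) := by
      intro t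
      rw [Bool.eq_iff_iff]
      rw [decide_eq_true_iff, pvContains_tag]
      simp only [List.any_eq_true, Bool.and_eq_true, beq_iff_eq]
    simp only [PySem.Set.contains_eq_listContains, List.contains_eq_mem, hc]
    have hord : FAMILY_ORDER = pvGroups.map Prod.fst := rfl
    rw [hord, List.filter_map]
    refine congrArg _ (List.filter_congr ?_)
    intro p hp
    simp only [pvGroups, List.mem_cons, List.not_mem_nil, or_false] at hp
    rcases hp with rfl|rfl|rfl|rfl|rfl|rfl|rfl|rfl|rfl <;>
      simp [PROGRAM_FAMILY_RULES]
  rw [hfilter]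
  split
  · simp_all
    assumption
  · simp_all

-- ===== VERDICT (by name: the statement is the Claim_ definition above) =====
theorem infer_program_family_spec : Claim_equal_infer_program_family := by
  intro text _
  unfold Spec_infer_program_family
  exact pvAB_eq text
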